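-- pv_equiv track=rewrite | github.com/DeveloperAcademy-POSTECH/Algorithm | TEAM A/Week 8/Jeckmu/92342. 양궁대회/양궁대회.py | solution
-- ===== SOURCE A (Python) =====
-- from itertools import product
--
-- def solution(n, info):
--     A = list(product([True, False], repeat=11))
--
--     max_score = 0
--     max_list = [0,0,0,0,0,0,0,0,0,0,0]
--
--     for a in A:
--         num = n
--         for i in range(11):
--             if a[i]:
--                 num -= info[i]+1
--
--         if num < 0:
--             continue
--
--         # 점수차 계산
--         lion = 0
--         apeach = 0
--         for i in range(11):
--             if a[i]:
--                 lion += 10-i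
--             elif info[i] > 0:
--                 apeach += 10-i
--
--         if max_score < lion - apeach:
--             max_score = lion - apeach
--             temp = []
--             for i in range(11):
--                 if a[i]:
--                     temp.append(info[i]+1)
--                 else:
--                     temp.append(0)
--
--             temp[10] += num
--             max_list = temp
--
--         elif max_score == lion - apeach:
--             temp = []
--             for i in range(11):
--                 if a[i]:
--                     temp.append(info[i]+1)
--                 else:
--                     temp.append(0)
--
--             temp[10] += num
--
--             # 더 낮은 점수가 높다면 바꿔치기
--             for i in range(10, -1, -1):
--                 if temp[i] > max_list[i]:
--                     max_list = temp
--                     break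
--                 elif temp[i] < max_list[i]:
--                     break
--
--     if max_score == 0:
--         max_list = [-1]
--
--     return max_list
-- ===== SOURCE B (Python) =====
-- def go(rings, rem, lion, apeach, alloc, best):
--     if not rings:
--         if rem < 0:
--             return best
--         d = lion - apeach
--         if d <= 0:
--             return best
--         final = alloc[:]
--         final[10] += rem
--         key = (d, tuple(reversed(final)))
--         if best is None or key > best[0]:
--             return (key, final)
--         return best
--     i, hit = rings[0]
--     rest = rings[1:]
--     # Lion wins ring i (one more arrow than Apeach), then the branch where Apeach keeps it
--     best = go(rest, rem - (hit + 1), lion + (10 - i), apeach, alloc + [hit + 1], best)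
--     best = go(rest, rem, lion, apeach + ((10 - i) if hit > 0 else 0), alloc + [0], best)
--     return best
--
-- def solution(n, info):
--     rings = [(i, info[i]) for i in range(11)]
--     best = go(rings, n, 0, 0, [], None)
--     return best[1] if best is not None else [-1]
-- ===== Notes on version B (the rewrite author's own statement) =====
-- stated objective: alternative
-- what changed: Replaces A's materialized 2^11 itertools.product table with three fresh range(11) scans and a manual descending tie-break loop per candidate by a recursive DFS over the 11 rings that accumulates remaining arrows, both scores and the allocation along the way and threads the best candidate under an explicit (score, reversed-allocation) comparison key.
import Mathlib
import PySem

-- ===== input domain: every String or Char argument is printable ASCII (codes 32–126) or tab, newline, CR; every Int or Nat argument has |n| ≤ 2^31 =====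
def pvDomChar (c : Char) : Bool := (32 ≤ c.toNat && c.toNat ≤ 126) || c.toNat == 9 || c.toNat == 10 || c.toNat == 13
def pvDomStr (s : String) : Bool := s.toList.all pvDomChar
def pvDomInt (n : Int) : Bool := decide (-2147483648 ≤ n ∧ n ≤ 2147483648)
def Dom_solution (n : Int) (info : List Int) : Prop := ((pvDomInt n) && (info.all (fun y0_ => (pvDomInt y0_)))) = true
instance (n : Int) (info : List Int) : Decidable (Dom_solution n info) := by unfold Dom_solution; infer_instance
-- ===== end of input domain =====

-- B replaces the materialized 2^11 product table, per-candidate range(11) rescans and the manual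
-- descending tie-break loop of A by a recursive DFS over the rings that threads the best candidate
-- under an explicit (score, reversed-allocation) key; objective: alternative (similar cost).


-- ===== PORT A =====
-- itertools.product([True, False], repeat=k), in product's order (first factor varies slowest)
def pyProdTF : Nat → List (List Bool)
  | 0 => [[]]
  | k + 1 => [true, false].flatMap (fun b => (pyProdTF k).map (fun t => b :: t))

-- A's tie-break loop 'for i in range(10, -1, -1): …' over the given index list
def tieA (temp maxl : List Int) : List Int → List Int
  | [] => maxl
  | i :: rest =>
    if PySem.List.pyGetD maxl i 0 < PySem.List.pyGetD temp i 0 then temp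
    else if PySem.List.pyGetD temp i 0 < PySem.List.pyGetD maxl i 0 then maxl
    else tieA temp maxl rest

-- the body of A's 'for a in A' loop, acting on the state (max_score, max_list)
def stepA (n : Int) (info : List Int) (st : Int × List Int) (a : List Bool) : Int × List Int :=
  let num := (PySem.List.pyRange 0 11 1).foldl
    (fun num i => if PySem.List.pyGetD a i false then num - (PySem.List.pyGetD info i 0 + 1) else num) n
  if num < 0 then st
  else
    let lion := (PySem.List.pyRange 0 11 1).foldl
      (fun lion i => if PySem.List.pyGetD a i false then lion + (10 - i) else lion) 0
    let apeach := (PySem.List.pyRange 0 11 1).foldl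
      (fun apeach i => if PySem.List.pyGetD a i false then apeach
        else if 0 < PySem.List.pyGetD info i 0 then apeach + (10 - i) else apeach) 0
    if st.1 < lion - apeach then
      let temp := (PySem.List.pyRange 0 11 1).map
        (fun i => if PySem.List.pyGetD a i false then PySem.List.pyGetD info i 0 + 1 else 0)
      (lion - apeach, temp.modify 10 (· + num))
    else if st.1 = lion - apeach then
      let temp := (PySem.List.pyRange 0 11 1).map
        (fun i => if PySem.List.pyGetD a i false then PySem.List.pyGetD info i 0 + 1 else 0)
      (st.1, tieA (temp.modify 10 (· + num)) st.2 (PySem.List.pyRange 10 (-1) (-1)))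
    else st

def solution (n : Int) (info : List Int) : List Int :=
  let A := pyProdTF 11
  let r := A.foldl (stepA n info) (0, [0, 0, 0, 0, 0, 0, 0, 0, 0, 0, 0])
  if r.1 = 0 then [-1] else r.2

-- ===== PORT B =====
-- Python tuple '>' on the reversed allocations (lexicographic, equal lengths here)
def lexGtInt : List Int → List Int → Bool
  | _ :: _, [] => true
  | [], _ => false
  | x :: xs, y :: ys => if y < x then true else if x < y then false else lexGtInt xs ys

-- Python '>' on the (score, reversed allocation) keys
def keyGt (k1 k2 : Int × List Int) : Bool :=
  if k2.1 < k1.1 then true else if k1.1 < k2.1 then false else lexGtInt k1.2 k2.2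

def goB (rings : List (Int × Int)) (rem lion apeach : Int) (alloc : List Int)
    (best : Option ((Int × List Int) × List Int)) : Option ((Int × List Int) × List Int) :=
  match rings with
  | [] =>
    if rem < 0 then best
    else
      let d := lion - apeach
      if d ≤ 0 then best
      else
        let fin := alloc.modify 10 (· + rem)
        let key := (d, fin.reverse)
        match best with
        | none => some (key, fin)
        | some b => if keyGt key b.1 then some (key, fin) else best
  | (i, hit) :: rest =>
    let best := goB rest (rem - (hit + 1)) (lion + (10 - i)) apeach (alloc ++ [hit + 1]) best
    goB rest rem lion (apeach + (if 0 < hit then 10 - i else 0)) (alloc ++ [0]) best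

def solution_alt (n : Int) (info : List Int) : List Int :=
  let rings := (PySem.List.pyRange 0 11 1).map (fun i => (i, PySem.List.pyGetD info i 0))
  match goB rings n 0 0 [] none with
  | some b => b.2
  | none => [-1]

-- ===== PRECONDITION & SPEC =====
-- Pre_ excludes exactly the inputs with fewer than 11 rings, on which A raises IndexError.
def Pre_solution (n : Int) (info : List Int) : Prop := 11 ≤ info.length
instance (n : Int) (info : List Int) : Decidable (Pre_solution n info) := by
  unfold Pre_solution; infer_instance

def pvWitness_solution : Int × List Int := (5, [2, 1, 1, 1, 0, 0, 0, 0, 0, 0, 0])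

def Spec_solution (n : Int) (info : List Int) (out : List Int) : Prop := out = solution_alt n info
instance (n : Int) (info : List Int) (out : List Int) : Decidable (Spec_solution n info out) := by
  unfold Spec_solution; infer_instance

-- ===== CLAIM (what is proved, stated in full; the proofs are below) =====
def Claim_equal_solution : Prop :=
  ∀ (n : Int) (info : List Int), Dom_solution n info → Pre_solution n info →
    Spec_solution n info (solution n info)

-- ===== LEMMAS AND PROOFS =====

-- per-suffix evaluations of a mask, starting at ring index j
def numOf (info : List Int) : Int → List Bool → Int
  | _, [] => 0
  | j, b :: m => (if b then PySem.List.pyGetD info j 0 + 1 else 0) + numOf info (j + 1) m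

def lionOf : Int → List Bool → Int
  | _, [] => 0
  | j, b :: m => (if b then 10 - j else 0) + lionOf (j + 1) m

def apeOf (info : List Int) : Int → List Bool → Int
  | _, [] => 0
  | j, b :: m =>
    (if b then 0 else if 0 < PySem.List.pyGetD info j 0 then 10 - j else 0) + apeOf info (j + 1) m

def allocOf (info : List Int) : Int → List Bool → List Int
  | _, [] => []
  | j, b :: m => (if b then PySem.List.pyGetD info j 0 + 1 else 0) :: allocOf info (j + 1) m

-- one decision of B's DFS, as a state transformer (j = current ring = alloc.length)
def push (info : List Int) (st : Int × Int × Int × List Int) (b : Bool) : Int × Int × Int × List Int :=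
  let j : Int := st.2.2.2.length
  let hit := PySem.List.pyGetD info j 0
  if b then (st.1 - (hit + 1), st.2.1 + (10 - j), st.2.2.1, st.2.2.2 ++ [hit + 1])
  else (st.1, st.2.1, st.2.2.1 + (if 0 < hit then 10 - j else 0), st.2.2.2 ++ [0])

-- B's leaf handler
def leaf (st : Int × Int × Int × List Int) (best : Option ((Int × List Int) × List Int)) :
    Option ((Int × List Int) × List Int) :=
  goB [] st.1 st.2.1 st.2.2.1 st.2.2.2 best

-- the invariant tying A's loop state to B's best option
def RelAB (s : Int × List Int) (b : Option ((Int × List Int) × List Int)) : Prop :=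
  match b with
  | none => s.1 = 0
  | some ((d, rv), fin) => s.1 = d ∧ s.2 = fin ∧ 0 < d ∧ rv = fin.reverse ∧ fin.length = 11

lemma length_allocOf (info : List Int) : ∀ (j : Int) (m : List Bool),
    (allocOf info j m).length = m.length := by
  intro j m
  induction m generalizing j with
  | nil => rfl
  | cons b m ih => simp [allocOf, ih]

lemma pushAll_eq (info : List Int) : ∀ (m : List Bool) (rem lion apeach : Int) (alloc : List Int),
    m.foldl (push info) (rem, lion, apeach, alloc)
      = (rem - numOf info alloc.length m, lion + lionOf alloc.length m,
         apeach + apeOf info alloc.length m, alloc ++ allocOf info alloc.length m) := by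
  intro m
  induction m with
  | nil => intro rem lion apeach alloc; simp [numOf, lionOf, apeOf, allocOf]
  | cons b m ih =>
    intro rem lion apeach alloc
    rw [List.foldl_cons]
    cases b with
    | true =>
      rw [show push info (rem, lion, apeach, alloc) true
          = (rem - (PySem.List.pyGetD info alloc.length 0 + 1), lion + (10 - (alloc.length : Int)),
             apeach, alloc ++ [PySem.List.pyGetD info alloc.length 0 + 1]) from rfl]
      rw [ih]
      simp [numOf, lionOf, apeOf, allocOf, Prod.ext_iff]
      push_cast
      ring_nf
      simp
    | false =>
      rw [show push info (rem, lion, apeach, alloc) false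
          = (rem, lion, apeach + (if 0 < PySem.List.pyGetD info alloc.length 0 then 10 - (alloc.length : Int) else 0),
             alloc ++ [0]) from rfl]
      rw [ih]
      simp [numOf, lionOf, apeOf, allocOf, Prod.ext_iff]
      push_cast
      ring_nf

lemma numFold (info : List Int) (full : List Bool) (hf : full.length = 11) :
    ∀ (k j : Nat) (s : Int), j + k = 11 →
    (PySem.List.pyRange (j : Int) 11 1).foldl
      (fun num i => if PySem.List.pyGetD full i false then num - (PySem.List.pyGetD info i 0 + 1) else num) s
      = s - numOf info (j : Int) (full.drop j) := by
  intro k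
  induction k with
  | zero =>
    intro j s h
    have hj : j = 11 := by omega
    subst hj
    rw [List.drop_eq_nil_of_le (by omega)]
    rw [show PySem.List.pyRange ((11:Nat) : Int) 11 1 = [] by decide]
    simp [numOf]
  | succ k ih =>
    intro j s h
    have hjl : j < full.length := by omega
    rw [PySem.List.pyRange_one_cons (by exact_mod_cast (by omega : (j:Int) < 11))]
    rw [List.foldl_cons]
    rw [List.drop_eq_getElem_cons hjl]
    have hget : PySem.List.pyGetD full (j : Int) false = full[j] := by
      simp [List.getD_eq_getElem?_getD, hjl]
    rw [hget]
    have hcast : ((j : Int) + 1) = ((j + 1 : Nat) : Int) := by push_cast; ring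
    rw [hcast, ih (j+1) _ (by omega)]
    simp only [numOf]
    cases full[j] <;> simp <;> ring

lemma lionFold (full : List Bool) (hf : full.length = 11) :
    ∀ (k j : Nat) (s : Int), j + k = 11 →
    (PySem.List.pyRange (j : Int) 11 1).foldl
      (fun lion i => if PySem.List.pyGetD full i false then lion + (10 - i) else lion) s
      = s + lionOf (j : Int) (full.drop j) := by
  intro k
  induction k with
  | zero =>
    intro j s h
    have hj : j = 11 := by omega
    subst hj
    rw [List.drop_eq_nil_of_le (by omega)]
    rw [show PySem.List.pyRange ((11:Nat) : Int) 11 1 = [] by decide]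
    simp [lionOf]
  | succ k ih =>
    intro j s h
    have hjl : j < full.length := by omega
    rw [PySem.List.pyRange_one_cons (by exact_mod_cast (by omega : (j:Int) < 11))]
    rw [List.foldl_cons]
    rw [List.drop_eq_getElem_cons hjl]
    have hget : PySem.List.pyGetD full (j : Int) false = full[j] := by
      simp [List.getD_eq_getElem?_getD, hjl]
    rw [hget]
    have hcast : ((j : Int) + 1) = ((j + 1 : Nat) : Int) := by push_cast; ring
    rw [hcast, ih (j+1) _ (by omega)]
    simp only [lionOf]
    cases full[j] <;> simp <;> ring

lemma apeFold (info : List Int) (full : List Bool) (hf : full.length = 11) :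
    ∀ (k j : Nat) (s : Int), j + k = 11 →
    (PySem.List.pyRange (j : Int) 11 1).foldl
      (fun apeach i => if PySem.List.pyGetD full i false then apeach
        else if 0 < PySem.List.pyGetD info i 0 then apeach + (10 - i) else apeach) s
      = s + apeOf info (j : Int) (full.drop j) := by
  intro k
  induction k with
  | zero =>
    intro j s h
    have hj : j = 11 := by omega
    subst hj
    rw [List.drop_eq_nil_of_le (by omega)]
    rw [show PySem.List.pyRange ((11:Nat) : Int) 11 1 = [] by decide]
    simp [apeOf]
  | succ k ih =>
    intro j s h
    have hjl : j < full.length := by omega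
    rw [PySem.List.pyRange_one_cons (by exact_mod_cast (by omega : (j:Int) < 11))]
    rw [List.foldl_cons]
    rw [List.drop_eq_getElem_cons hjl]
    have hget : PySem.List.pyGetD full (j : Int) false = full[j] := by
      simp [List.getD_eq_getElem?_getD, hjl]
    rw [hget]
    have hcast : ((j : Int) + 1) = ((j + 1 : Nat) : Int) := by push_cast; ring
    rw [hcast, ih (j+1) _ (by omega)]
    simp only [apeOf]
    cases full[j] <;> split_ifs <;> simp <;> ring

lemma tempMap (info : List Int) (full : List Bool) (hf : full.length = 11) :
    ∀ (k j : Nat), j + k = 11 →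
    (PySem.List.pyRange (j : Int) 11 1).map
      (fun i => if PySem.List.pyGetD full i false then PySem.List.pyGetD info i 0 + 1 else 0)
      = allocOf info (j : Int) (full.drop j) := by
  intro k
  induction k with
  | zero =>
    intro j h
    have hj : j = 11 := by omega
    subst hj
    rw [List.drop_eq_nil_of_le (by omega)]
    rw [show PySem.List.pyRange ((11:Nat) : Int) 11 1 = [] by decide]
    simp [allocOf]
  | succ k ih =>
    intro j h
    have hjl : j < full.length := by omega
    rw [PySem.List.pyRange_one_cons (by exact_mod_cast (by omega : (j:Int) < 11))]
    rw [List.map_cons]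
    rw [List.drop_eq_getElem_cons hjl]
    have hget : PySem.List.pyGetD full (j : Int) false = full[j] := by
      simp [List.getD_eq_getElem?_getD, hjl]
    rw [hget]
    have hcast : ((j : Int) + 1) = ((j + 1 : Nat) : Int) := by push_cast; ring
    rw [hcast, ih (j+1) (by omega)]
    simp only [allocOf]
    rw [hcast]

def descL : Nat → List Int
  | 0 => []
  | k + 1 => (k : Int) :: descL k

lemma pyRangeDesc : PySem.List.pyRange 10 (-1) (-1) = descL 11 := by decide

lemma tie_eq : ∀ (k : Nat) (a bl : List Int), k ≤ a.length → k ≤ bl.length →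
    tieA a bl (descL k) = if lexGtInt ((a.take k).reverse) ((bl.take k).reverse) then a else bl := by
  intro k
  induction k with
  | zero => intro a bl _ _; simp [descL, tieA, lexGtInt]
  | succ k ih =>
    intro a bl ha hb
    have ha' : k < a.length := by omega
    have hb' : k < bl.length := by omega
    rw [show descL (k+1) = (k : Int) :: descL k from rfl]
    have hga : PySem.List.pyGetD a (k : Int) 0 = a[k] := by
      simp [List.getD_eq_getElem?_getD, ha']
    have hgb : PySem.List.pyGetD bl (k : Int) 0 = bl[k] := by
      simp [List.getD_eq_getElem?_getD, hb']
    have hta : (a.take (k+1)).reverse = a[k] :: (a.take k).reverse := by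
      rw [List.take_succ]
      simp [List.getElem?_eq_getElem ha']
    have htb : (bl.take (k+1)).reverse = bl[k] :: (bl.take k).reverse := by
      rw [List.take_succ]
      simp [List.getElem?_eq_getElem hb']
    rw [hta, htb]
    simp only [tieA, hga, hgb, lexGtInt]
    by_cases h1 : bl[k] < a[k]
    · simp [h1]
    · by_cases h2 : a[k] < bl[k]
      · simp [h1, h2]
      · simp [h1, h2]
        exact ih a bl (by omega) (by omega)

lemma stepA_eq (n : Int) (info : List Int) (m : List Bool) (hm : m.length = 11) (s : Int × List Int) :
    stepA n info s m =
      (let num := n - numOf info 0 m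
       let d := lionOf 0 m - apeOf info 0 m
       let temp := (allocOf info 0 m).modify 10 (· + num)
       if num < 0 then s
       else if s.1 < d then (d, temp)
       else if s.1 = d then (s.1, tieA temp s.2 (PySem.List.pyRange 10 (-1) (-1)))
       else s) := by
  have hnum := numFold info m hm 11 0 n rfl
  have hlion := lionFold m hm 11 0 0 rfl
  have hape := apeFold info m hm 11 0 0 rfl
  have htemp := tempMap info m hm 11 0 rfl
  simp only [Nat.cast_zero, List.drop_zero, zero_add] at hnum hlion hape htemp
  unfold stepA
  rw [hnum, hlion, hape, htemp]

lemma step_rel (n : Int) (info : List Int) (m : List Bool) (hm : m.length = 11)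
    (s : Int × List Int) (b : Option ((Int × List Int) × List Int)) (hr : RelAB s b) :
    RelAB (stepA n info s m) (leaf (m.foldl (push info) (n, 0, 0, [])) b) := by
  obtain ⟨s1, s2⟩ := s
  rw [stepA_eq n info m hm (s1, s2), pushAll_eq info m n 0 0 []]
  simp only [List.length_nil, Nat.cast_zero, zero_add, List.nil_append]
  simp only [leaf, goB]
  have htl : ((allocOf info 0 m).modify 10 (· + (n - numOf info 0 m))).length = 11 := by
    simp [length_allocOf, hm]
  by_cases hneg : n - numOf info 0 m < 0
  · rw [if_pos hneg, if_pos hneg]; exact hr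
  · rw [if_neg hneg, if_neg hneg]
    cases b with
    | none =>
      simp only [RelAB] at hr
      by_cases hd : 0 < lionOf 0 m - apeOf info 0 m
      · rw [if_pos (by omega : s1 < lionOf 0 m - apeOf info 0 m),
            if_neg (by omega : ¬ lionOf 0 m - apeOf info 0 m ≤ 0)]
        exact ⟨rfl, rfl, hd, rfl, htl⟩
      · rw [if_neg (by omega : ¬ s1 < lionOf 0 m - apeOf info 0 m),
            if_pos (by omega : lionOf 0 m - apeOf info 0 m ≤ 0)]
        by_cases hd0 : s1 = lionOf 0 m - apeOf info 0 m
        · rw [if_pos hd0]; exact hr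
        · rw [if_neg hd0]; exact hr
    | some p =>
      obtain ⟨⟨bd, rv⟩, fin⟩ := p
      simp only [RelAB] at hr
      obtain ⟨h1, h2, h3, h4, h5⟩ := hr
      subst h1 h2 h4
      dsimp only
      by_cases hd : lionOf 0 m - apeOf info 0 m ≤ 0
      · rw [if_neg (by omega : ¬ s1 < lionOf 0 m - apeOf info 0 m),
            if_neg (by omega : ¬ s1 = lionOf 0 m - apeOf info 0 m), if_pos hd]
        exact ⟨rfl, rfl, h3, rfl, h5⟩
      · rw [if_neg hd]
        rcases lt_trichotomy s1 (lionOf 0 m - apeOf info 0 m) with hlt | heq | hgt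
        · rw [if_pos hlt]
          have hk : keyGt (lionOf 0 m - apeOf info 0 m,
              ((allocOf info 0 m).modify 10 (· + (n - numOf info 0 m))).reverse)
              (s1, s2.reverse) = true := by
            simp [keyGt, hlt]
          rw [hk]
          simp only [if_true]
          exact ⟨rfl, rfl, by omega, rfl, htl⟩
        · rw [if_neg (by omega : ¬ s1 < lionOf 0 m - apeOf info 0 m), if_pos heq]
          rw [pyRangeDesc,
              tie_eq 11 ((allocOf info 0 m).modify 10 (· + (n - numOf info 0 m))) s2
                (by omega) (by omega)]
          rw [List.take_of_length_le (by omega), List.take_of_length_le (by omega)]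
          have hk : keyGt (lionOf 0 m - apeOf info 0 m,
              ((allocOf info 0 m).modify 10 (· + (n - numOf info 0 m))).reverse)
              (s1, s2.reverse)
              = lexGtInt ((allocOf info 0 m).modify 10 (· + (n - numOf info 0 m))).reverse
                  s2.reverse := by
            simp [keyGt, heq]
          rw [hk]
          by_cases hlex : lexGtInt ((allocOf info 0 m).modify 10 (· + (n - numOf info 0 m))).reverse
              s2.reverse = true
          · rw [if_pos hlex, if_pos hlex]
            exact ⟨by omega, rfl, by omega, rfl, htl⟩
          · rw [if_neg hlex, if_neg hlex]
            exact ⟨rfl, rfl, h3, rfl, h5⟩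
        · rw [if_neg (by omega : ¬ s1 < lionOf 0 m - apeOf info 0 m),
            if_neg (by omega : ¬ s1 = lionOf 0 m - apeOf info 0 m)]
          have hk : keyGt (lionOf 0 m - apeOf info 0 m,
              ((allocOf info 0 m).modify 10 (· + (n - numOf info 0 m))).reverse)
              (s1, s2.reverse) = false := by
            simp only [keyGt]
            rw [if_neg (by omega), if_pos (by omega)]
          rw [hk]
          simp only [Bool.false_eq_true, if_false]
          exact ⟨rfl, rfl, h3, rfl, h5⟩

lemma fold_rel (n : Int) (info : List Int) : ∀ (l : List (List Bool)) (s : Int × List Int)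
    (b : Option ((Int × List Int) × List Int)), (∀ m ∈ l, m.length = 11) → RelAB s b →
    RelAB (l.foldl (stepA n info) s)
        (l.foldl (fun b m => leaf (m.foldl (push info) (n, 0, 0, [])) b) b) := by
  intro l
  induction l with
  | nil => intro s b _ hr; exact hr
  | cons m l ih =>
    intro s b hl hr
    exact ih _ _ (fun x hx => hl x (List.mem_cons_of_mem _ hx))
      (step_rel n info m (hl m (List.mem_cons_self ..)) s b hr)

lemma prodTF_succ (k : Nat) :
    pyProdTF (k+1) = (pyProdTF k).map (true :: ·) ++ (pyProdTF k).map (false :: ·) := by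
  simp [pyProdTF, List.flatMap]

lemma prodTF_len : ∀ (k : Nat) (m : List Bool), m ∈ pyProdTF k → m.length = k := by
  intro k
  induction k with
  | zero => intro m hm; simp [pyProdTF] at hm; simp [hm]
  | succ k ih =>
    intro m hm
    rw [prodTF_succ] at hm
    simp at hm
    rcases hm with ⟨t, ht, rfl⟩ | ⟨t, ht, rfl⟩ <;> simp [ih t ht]

lemma goB_eq_fold (n : Int) (info : List Int) (hpre : 11 ≤ info.length) :
    ∀ (k j : Nat) (rem lion apeach : Int) (alloc : List Int)
      (best : Option ((Int × List Int) × List Int)), alloc.length = j → j + k = 11 →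
    goB (((PySem.List.pyRange 0 11 1).map (fun i => (i, PySem.List.pyGetD info i 0))).drop j) rem lion apeach alloc best
      = (pyProdTF k).foldl
          (fun b m => leaf (m.foldl (push info) (rem, lion, apeach, alloc)) b) best := by
  have hElen : ((PySem.List.pyRange 0 11 1).map (fun i => (i, PySem.List.pyGetD info i 0))).length = 11 := by
    simp [List.length_map]
  intro k
  induction k with
  | zero =>
    intro j rem lion apeach alloc best hlen hsum
    have hj : j = 11 := by omega
    subst hj
    rw [List.drop_eq_nil_of_le (by omega)]
    rfl
  | succ k ih =>
    intro j rem lion apeach alloc best hlen hsum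
    have hjlt : j < 11 := by omega
    have hjinfo : j < info.length := by omega
    have hEj : ((PySem.List.pyRange 0 11 1).map (fun i => (i, PySem.List.pyGetD info i 0)))[j]'(by omega)
        = ((j : Int), info[j]) := by
      rw [List.getElem_map]
      have hr : (PySem.List.pyRange 0 11 1)[j]'(by
          rw [show PySem.List.pyRange 0 11 1 = [0,1,2,3,4,5,6,7,8,9,10] by decide]; simpa using hjlt)
          = (j : Int) := by
        rw [show PySem.List.pyRange 0 11 1 = [0,1,2,3,4,5,6,7,8,9,10] by decide] at *
        interval_cases j <;> simp
      rw [hr]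
      simp only [PySem.List.pyGetD_natCast]
      rw [List.getD_eq_getElem _ _ hjinfo]
    rw [List.drop_eq_getElem_cons (by omega : j < ((PySem.List.pyRange 0 11 1).map (fun i => (i, PySem.List.pyGetD info i 0))).length)]
    rw [hEj]
    have hg : PySem.List.pyGetD info ((alloc.length : Nat) : Int) 0 = info[j] := by
      rw [hlen]
      simp only [PySem.List.pyGetD_natCast]
      exact List.getD_eq_getElem _ _ hjinfo
    have hpt : push info (rem, lion, apeach, alloc) true
        = (rem - (info[j] + 1), lion + (10 - (j : Int)), apeach, alloc ++ [info[j] + 1]) := by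
      simp [push, hg, hlen, List.getElem?_eq_getElem hjinfo]
    have hpf : push info (rem, lion, apeach, alloc) false
        = (rem, lion, apeach + (if 0 < info[j] then 10 - (j : Int) else 0), alloc ++ [0]) := by
      simp [push, hg, hlen, List.getElem?_eq_getElem hjinfo]
    rw [show goB (((j : Int), info[j]) :: ((PySem.List.pyRange 0 11 1).map (fun i => (i, PySem.List.pyGetD info i 0))).drop (j+1)) rem lion apeach alloc best
        = goB (((PySem.List.pyRange 0 11 1).map (fun i => (i, PySem.List.pyGetD info i 0))).drop (j+1)) rem lion
            (apeach + (if 0 < info[j] then 10 - (j : Int) else 0)) (alloc ++ [0])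
            (goB (((PySem.List.pyRange 0 11 1).map (fun i => (i, PySem.List.pyGetD info i 0))).drop (j+1))
              (rem - (info[j] + 1)) (lion + (10 - (j : Int))) apeach (alloc ++ [info[j] + 1]) best) from rfl]
    rw [ih (j+1) (rem - (info[j] + 1)) (lion + (10 - (j : Int))) apeach (alloc ++ [info[j] + 1]) best
        (by simp [hlen]) (by omega)]
    rw [ih (j+1) rem lion (apeach + (if 0 < info[j] then 10 - (j : Int) else 0)) (alloc ++ [0]) _
        (by simp [hlen]) (by omega)]
    rw [prodTF_succ, List.foldl_append, List.foldl_map, List.foldl_map]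
    simp only [List.foldl_cons, hpt, hpf]

-- ===== VERDICT (by name: the statement is the Claim_ definition above) =====
set_option maxRecDepth 8192 in
theorem solution_spec : Claim_equal_solution := by
  intro n info _ hpre
  unfold Spec_solution
  have hfold := goB_eq_fold n info hpre 11 0 n 0 0 [] none rfl rfl
  simp only [List.drop_zero] at hfold
  have hrel := fold_rel n info (pyProdTF 11) (0, [0,0,0,0,0,0,0,0,0,0,0]) none
    (fun m hm => prodTF_len 11 m hm) rfl
  rw [← hfold] at hrel
  unfold solution solution_alt
  revert hrel
  cases hb : goB ((PySem.List.pyRange 0 11 1).map (fun i => (i, PySem.List.pyGetD info i 0))) n 0 0 [] none with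
  | none =>
    intro hrel
    simp only [RelAB] at hrel
    simp [hb, hrel]
  | some p =>
    intro hrel
    obtain ⟨⟨d, rv⟩, fin⟩ := p
    simp only [RelAB] at hrel
    obtain ⟨h1, h2, h3, _, _⟩ := hrel
    have hne : ¬ (List.foldl (stepA n info) (0, [0,0,0,0,0,0,0,0,0,0,0]) (pyProdTF 11)).1 = 0 := by
      rw [h1]; omega
    simp [hb, hne, h2]
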